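-- pv_equiv track=rewrite | github.com/emmanueltab/dataAnalysisWithPython | s22-python-proj-emmanueltab-main/code samples.py/functions for parser.py/doc dictonaryy.py | build_doc_dictionary
-- ===== SOURCE A (Python) =====
-- def build_doc_dictionary(data):
--     all_unique = {}
--     count_unique = 0
--     temp_dictionary = {}
--     for document, word_list in data.items():
--         for word in word_list:
--             # creates all_values with key being document and value being amount of unique words in the document
--             if word_list.count(word) == 1:
--                 count_unique = count_unique + 1
--         all_unique[document] = count_unique
--         count_unique = 0
--
--     temp_dictionary = all_unique
--     return temp_dictionary
-- ===== SOURCE B (Python) =====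
-- def build_doc_dictionary(data):
--     result = {}
--     for document, word_list in data.items():
--         s = sorted(word_list)
--         n = len(s)
--         singles = 0
--         i = 0
--         while i < n:
--             j = i + 1
--             while j < n and s[j] == s[i]:
--                 j += 1
--             if j - i == 1:
--                 singles += 1
--             i = j
--         result[document] = singles
--     return result
-- ===== Notes on version B (the rewrite author's own statement) =====
-- stated objective: alternative
-- what changed: Per document, instead of calling word_list.count(word) for every word (a nested rescan), B sorts the word list once and counts length-1 runs in a single pass over the sorted list.
import Mathlib
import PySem

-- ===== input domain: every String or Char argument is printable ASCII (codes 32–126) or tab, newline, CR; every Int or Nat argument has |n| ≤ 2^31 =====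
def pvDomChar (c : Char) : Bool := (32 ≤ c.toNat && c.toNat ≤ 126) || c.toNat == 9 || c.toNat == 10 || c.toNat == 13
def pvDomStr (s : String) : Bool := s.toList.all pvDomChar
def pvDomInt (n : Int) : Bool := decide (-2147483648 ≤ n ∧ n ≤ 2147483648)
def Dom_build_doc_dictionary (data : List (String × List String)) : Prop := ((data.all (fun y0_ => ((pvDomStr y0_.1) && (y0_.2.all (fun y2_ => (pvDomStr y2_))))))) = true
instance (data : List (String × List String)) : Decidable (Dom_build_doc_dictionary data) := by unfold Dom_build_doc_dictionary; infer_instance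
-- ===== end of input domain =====

-- B replaces A's per-word word_list.count(word) rescans by sorting each document's
-- word list once and counting length-1 runs in a single pass (objective: alternative).

-- ===== PORT A =====
-- for document, word_list in data.items(): for word in word_list: if word_list.count(word) == 1:
-- count_unique += 1; all_unique[document] = count_unique; count_unique = 0
-- — loop state is the pair (all_unique, count_unique)
def build_doc_dictionary (data : List (String × List String)) : List (String × Int) :=
  let st := data.foldl
    (fun st dw =>
      let count_unique := dw.2.foldl
        (fun c word => if PySem.List.count dw.2 word == (1 : Int) then c + 1 else c) st.2
      (st.1.insert dw.1 count_unique, (0 : Int)))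
    ((PySem.Dict.empty : PySem.Dict String Int), (0 : Int))
  st.1.items

-- ===== PORT B =====
-- the two while loops of Source B: the inner 'while j < n and s[j] == s[i]' run is the maximal
-- block of elements equal to the head (takeWhile/dropWhile), and 'j - i == 1' says that
-- block has no tail; the outer while advances to the next run (the recursive call)
def pvCountSingles : List String → Int
  | [] => 0
  | x :: xs =>
    (if (xs.takeWhile (fun y => y == x)).length == 0 then 1 else 0)
      + pvCountSingles (xs.dropWhile (fun y => y == x))
termination_by s => s.length
decreasing_by
  exact Nat.lt_succ_of_le (List.length_dropWhile_le _ _)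

def build_doc_dictionary_alt (data : List (String × List String)) : List (String × Int) :=
  (data.foldl
    (fun result dw =>
      result.insert dw.1 (pvCountSingles (PySem.List.sorted dw.2 (fun x => x) false)))
    (PySem.Dict.empty : PySem.Dict String Int)).items

-- ===== PRECONDITION & SPEC =====
def Spec_build_doc_dictionary (data : List (String × List String)) (out : List (String × Int)) : Prop := out = build_doc_dictionary_alt data
instance (data : List (String × List String)) (out : List (String × Int)) : Decidable (Spec_build_doc_dictionary data out) := by unfold Spec_build_doc_dictionary; infer_instance

-- ===== CLAIM (what is proved, stated in full; the proofs are below) =====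
def Claim_equal_build_doc_dictionary : Prop := ∀ (data : List (String × List String)), Dom_build_doc_dictionary data → Spec_build_doc_dictionary data (build_doc_dictionary data)

-- ===== LEMMAS AND PROOFS =====

-- on a sorted list s, the singleton-run count of B's scan is the number of elements
-- of s whose multiplicity in s is exactly 1 (strong induction, peeling one run)
lemma pvAux : ∀ (n : Nat) (s : List String), s.length ≤ n → s.Pairwise (· ≤ ·) →
    pvCountSingles s = (s.countP (fun w => s.count w == 1) : Int) := by
  intro n
  induction n with
  | zero =>
    intro s hl _
    have : s = [] := List.eq_nil_of_length_eq_zero (Nat.le_zero.mp hl)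
    subst this; simp [pvCountSingles]
  | succ n ih =>
    intro s hl hs
    match s with
    | [] => simp [pvCountSingles]
    | x :: xs =>
      rcases List.pairwise_cons.mp hs with ⟨hx, hxs⟩
      set t := xs.takeWhile (fun y => y == x) with ht_def
      set r := xs.dropWhile (fun y => y == x) with hr_def
      have hxs_eq : t ++ r = xs := List.takeWhile_append_dropWhile
      have ht : ∀ y ∈ t, y = x := by
        intro y hy
        exact eq_of_beq (List.mem_takeWhile_imp (p := fun z => z == x) (l := xs) hy)
      have hr_sub : r.Sublist xs := List.dropWhile_sublist _
      have hr_sorted : r.Pairwise (· ≤ ·) := hxs.sublist hr_sub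
      have hrx : ∀ y ∈ r, y ≠ x := by
        intro y hy heq
        rcases List.exists_cons_of_ne_nil (List.ne_nil_of_mem hy) with ⟨b, rb, hbr⟩
        have w : r ≠ [] := List.ne_nil_of_mem hy
        have hb0 : (r.head w == x) = false :=
          List.head_dropWhile_not (fun z => z == x) (l := xs) w
        have hh : r.head w = b := by
          have h1 : r.head? = some (r.head w) := List.head?_eq_some_head w
          have h2 : r.head? = some b := by rw [hbr]; rfl
          exact Option.some.inj (h1.symm.trans h2)
        have hbx : b ≠ x := by rw [hh] at hb0; simpa using hb0
        have hxb : x ≤ b := hx b (hr_sub.mem (by rw [hbr]; simp))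
        have hby : b ≤ y := by
          have hp : (b :: rb).Pairwise (· ≤ ·) := hbr ▸ hr_sorted
          have hy' : y ∈ b :: rb := hbr ▸ hy
          rcases List.mem_cons.mp hy' with h | h
          · exact le_of_eq h.symm
          · exact (List.pairwise_cons.mp hp).1 y h
        exact hbx (le_antisymm (heq ▸ hby) hxb)
      have hct : t.count x = t.length := List.count_eq_length.mpr (fun b hb => (ht b hb).symm)
      have hcr : r.count x = 0 := List.count_eq_zero.mpr (fun hmem => hrx x hmem rfl)
      have hcx : (x :: xs).count x = 1 + t.length := by
        rw [← hxs_eq, List.count_cons_self, List.count_append, hct, hcr]; omega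
      have hcy : ∀ y ∈ r, (x :: xs).count y = r.count y := by
        intro y hy
        have hyx := hrx y hy
        have hty : t.count y = 0 := List.count_eq_zero.mpr (fun hmem => hyx (ht y hmem))
        have hbeq : (x == y) = false := by simpa using (Ne.symm hyx)
        rw [← hxs_eq]
        simp [List.count_cons, List.count_append, hty, hbeq]
      have hcpr : (r.countP (fun w => (x :: xs).count w == 1))
          = r.countP (fun w => r.count w == 1) :=
        List.countP_congr (fun y hy => by rw [hcy y hy])
      have hlenr : r.length ≤ n := le_trans (List.length_dropWhile_le _ _)
        (Nat.le_of_succ_le_succ hl)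
      have hir : pvCountSingles r = (r.countP (fun w => r.count w == 1) : Int) :=
        ih r hlenr hr_sorted
      have hcpt : t.countP (fun w => (x :: xs).count w == 1)
          = if ((x :: xs).count x == 1) then t.length else 0 := by
        by_cases hpx : ((x :: xs).count x == 1) = true
        · rw [if_pos hpx]
          exact List.countP_eq_length.mpr (fun b hb => (ht b hb) ▸ hpx)
        · rw [if_neg hpx]
          exact List.countP_eq_zero.mpr (fun b hb hc => hpx ((ht b hb) ▸ hc))
      rw [pvCountSingles]
      rw [← ht_def, ← hr_def, hir]
      have hsplit : (x :: xs).countP (fun w => (x :: xs).count w == 1)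
          = t.countP (fun w => (x :: xs).count w == 1)
            + r.countP (fun w => (x :: xs).count w == 1)
            + (if ((x :: xs).count x == 1) then 1 else 0) := by
        conv_lhs => rw [← hxs_eq]
        rw [List.countP_cons, List.countP_append, ← hxs_eq]
      rw [hsplit, hcpt, hcpr, hcx]
      simp only [beq_iff_eq]
      by_cases hT : t.length = 0
      · rw [if_pos hT, if_pos (by omega), if_pos (by omega)]
        push_cast
        omega
      · rw [if_neg hT, if_neg (by omega), if_neg (by omega)]
        push_cast
        omega

-- per document, A's inner counting loop equals B's sort-and-scan
lemma pvDoc_eq (wl : List String) (c : Int) :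
    wl.foldl (fun c word => if PySem.List.count wl word == (1 : Int) then c + 1 else c) c
      = c + pvCountSingles (PySem.List.sorted wl (fun x => x) false) := by
  rw [PySem.List.foldl_count_if (fun word => PySem.List.count wl word == (1 : Int)) wl c]
  congr 1
  have hperm : (PySem.List.sorted wl (fun x => x) false).Perm wl :=
    PySem.List.sorted_perm wl _ false
  have hpair : (PySem.List.sorted wl (fun x => x) false).Pairwise (· ≤ ·) := by
    simpa using PySem.List.sorted_pairwise wl (fun x => x)
  rw [pvAux (PySem.List.sorted wl (fun x => x) false).length _ le_rfl hpair]
  have hcnt : (PySem.List.sorted wl (fun x => x) false).countP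
        (fun w => (PySem.List.sorted wl (fun x => x) false).count w == 1)
      = wl.countP (fun w => PySem.List.count wl w == (1 : Int)) := by
    rw [List.countP_congr (q := fun w => PySem.List.count wl w == (1 : Int))
      (fun y _ => by simp [PySem.List.count_eq, hperm.count_eq y])]
    exact hperm.countP_eq _
  exact_mod_cast hcnt.symm

-- ===== VERDICT (by name: the statement is the Claim_ definition above) =====
theorem build_doc_dictionary_spec : Claim_equal_build_doc_dictionary := by
  intro data hdom
  show build_doc_dictionary data = build_doc_dictionary_alt data
  unfold build_doc_dictionary build_doc_dictionary_alt
  suffices h : ∀ (d : PySem.Dict String Int),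
      (data.foldl (fun st dw =>
        let count_unique := dw.2.foldl
          (fun c word => if PySem.List.count dw.2 word == (1 : Int) then c + 1 else c) st.2
        (st.1.insert dw.1 count_unique, (0 : Int))) (d, (0 : Int))).1
      = data.foldl (fun result dw =>
          result.insert dw.1 (pvCountSingles (PySem.List.sorted dw.2 (fun x => x) false))) d by
    simp only [h]
  clear hdom
  intro d
  induction data generalizing d with
  | nil => rfl
  | cons hd tl ih =>
    simp only [List.foldl_cons]
    rw [show (hd.2.foldl (fun c word => if PySem.List.count hd.2 word == (1 : Int) then c + 1 else c) (0 : Int))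
          = pvCountSingles (PySem.List.sorted hd.2 (fun x => x) false) by
        simpa using pvDoc_eq hd.2 0]
    simpa using ih (d.insert hd.1 (pvCountSingles (PySem.List.sorted hd.2 (fun x => x) false)))
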